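-- pv_equiv track=rewrite | github.com/vidyagamishere/ai-news-scraper | api/email_service.py | _filter_content_by_preferences
-- ===== SOURCE A (Python) =====
-- from typing import List, Dict, Optional
--
-- def _filter_content_by_preferences(articles: List[Dict], preferences: Dict) -> List[Dict]:
--     """Filter articles based on user preferences"""
--     if not preferences:
--         return articles
--
--     # Filter by categories
--     categories = preferences.get('categories', ['all'])
--     if 'all' not in categories:
--         # Simple category matching based on keywords
--         category_keywords = {
--             'research': ['research', 'study', 'paper', 'academic', 'arxiv'],
--             'industry': ['company', 'business', 'startup', 'funding', 'acquisition'],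
--             'tools': ['tool', 'platform', 'software', 'app', 'service'],
--             'regulations': ['regulation', 'policy', 'law', 'government', 'ethics'],
--             'startups': ['startup', 'funding', 'investment', 'venture', 'seed']
--         }
--
--         filtered_articles = []
--         for article in articles:
--             content_lower = (article.get('title', '') + ' ' + article.get('content', '')).lower()
--             for category in categories:
--                 if category in category_keywords:
--                     if any(keyword in content_lower for keyword in category_keywords[category]):
--                         filtered_articles.append(article)
--                         break
--
--         return filtered_articles if filtered_articles else articles[:5]  # Fallback to top 5
--
--     return articles
-- ===== SOURCE B (Python) =====
-- from typing import List, Dict, Optional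
--
-- def _filter_content_by_preferences(articles: List[Dict], preferences: Dict) -> List[Dict]:
--     """Filter articles by preference categories: precompute the keyword union,
--     then mark a hit-flag array keyword-by-keyword and collect flagged articles."""
--     if not preferences:
--         return articles
--     categories = preferences.get('categories', ['all'])
--     if 'all' in categories:
--         return articles
--     category_keywords = {
--         'research': ['research', 'study', 'paper', 'academic', 'arxiv'],
--         'industry': ['company', 'business', 'startup', 'funding', 'acquisition'],
--         'tools': ['tool', 'platform', 'software', 'app', 'service'],
--         'regulations': ['regulation', 'policy', 'law', 'government', 'ethics'],
--         'startups': ['startup', 'funding', 'investment', 'venture', 'seed']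
--     }
--     keywords = set()
--     for category in categories:
--         keywords.update(category_keywords.get(category, []))
--     texts = [(a.get('title', '') + ' ' + a.get('content', '')).lower() for a in articles]
--     hits = [False] * len(articles)
--     for kw in keywords:
--         hits = [h or kw in t for h, t in zip(hits, texts)]
--     filtered = [a for a, h in zip(articles, hits) if h]
--     return filtered if filtered else articles[:5]
-- ===== Notes on version B (the rewrite author's own statement) =====
-- stated objective: alternative
-- what changed: B precomputes the union set of keywords for the chosen categories, builds the lowercased texts in a separate pass, then marks a boolean hit array keyword-by-keyword (keyword-outer loop) and collects the flagged articles by zipping, instead of A's article-outer loop over categories with an inner break and an append accumulator.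
import Mathlib
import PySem

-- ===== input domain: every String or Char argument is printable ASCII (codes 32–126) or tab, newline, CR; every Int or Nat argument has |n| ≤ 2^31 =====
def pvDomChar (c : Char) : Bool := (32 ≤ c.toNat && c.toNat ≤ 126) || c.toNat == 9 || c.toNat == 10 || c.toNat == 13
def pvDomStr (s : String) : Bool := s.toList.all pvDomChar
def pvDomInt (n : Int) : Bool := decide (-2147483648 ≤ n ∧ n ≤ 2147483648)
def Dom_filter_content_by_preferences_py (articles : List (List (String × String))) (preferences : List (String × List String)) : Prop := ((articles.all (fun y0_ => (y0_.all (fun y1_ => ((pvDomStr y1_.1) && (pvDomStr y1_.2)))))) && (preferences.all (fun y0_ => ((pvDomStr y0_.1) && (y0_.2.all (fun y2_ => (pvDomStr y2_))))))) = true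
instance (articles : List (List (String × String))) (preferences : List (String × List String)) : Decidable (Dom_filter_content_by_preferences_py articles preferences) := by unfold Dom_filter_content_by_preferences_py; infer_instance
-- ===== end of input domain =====

-- B replaces A's article-outer scan over categories (with break) by a staged pipeline:
-- keyword-union set, lowercased-texts pass, keyword-outer hit-marking pass, zip-collect.

-- the module-level category_keywords table (shared literal data, used by both ports)
def pvCatKeywords : PySem.Dict String (List String) := PySem.Dict.ofList
  [("research", ["research", "study", "paper", "academic", "arxiv"]),
   ("industry", ["company", "business", "startup", "funding", "acquisition"]),
   ("tools", ["tool", "platform", "software", "app", "service"]),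
   ("regulations", ["regulation", "policy", "law", "government", "ethics"]),
   ("startups", ["startup", "funding", "investment", "venture", "seed"])]

-- ===== PORT A =====
-- per-article body: content_lower, then 'for category in categories: … break' = any
def pvMatchesA (categories : List String) (article : List (String × String)) : Bool :=
  let content_lower := PySem.Chars.lower
    ((PySem.Dict.getD (PySem.Dict.mk article) "title" "").toList
      ++ ' ' :: (PySem.Dict.getD (PySem.Dict.mk article) "content" "").toList)
  categories.any (fun category =>
    match PySem.Dict.get? pvCatKeywords category with
    | some kws => kws.any (fun kw => PySem.Chars.isIn kw.toList content_lower)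
    | none => false)

-- 'filtered_articles = []; for article in articles: …append…'
def pvFilteredA (categories : List String) (articles : List (List (String × String))) : List (List (String × String)) :=
  articles.foldl (fun acc article => if pvMatchesA categories article then acc ++ [article] else acc) []

def filter_content_by_preferences_py (articles : List (List (String × String))) (preferences : List (String × List String)) : List (List (String × String)) :=
  if preferences = [] then articles
  else if !((PySem.Dict.getD (PySem.Dict.mk preferences) "categories" ["all"]).contains "all") then
    (if pvFilteredA (PySem.Dict.getD (PySem.Dict.mk preferences) "categories" ["all"]) articles ≠ []
     then pvFilteredA (PySem.Dict.getD (PySem.Dict.mk preferences) "categories" ["all"]) articles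
     else PySem.List.slice articles none (some 5))
  else articles

-- ===== PORT B =====
-- 'keywords = set(); for category in categories: keywords.update(table.get(category, []))'
def pvKeywordUnion (categories : List String) : PySem.Set String :=
  categories.foldl (fun s category => PySem.Set.update s (PySem.Dict.getD pvCatKeywords category [])) PySem.Set.empty

-- '(a.get('title','') + ' ' + a.get('content','')).lower()' (exact on the ASCII domain)
def pvTextLower (article : List (String × String)) : List Char :=
  PySem.Chars.lower ((PySem.Dict.getD (PySem.Dict.mk article) "title" "").toList
    ++ ' ' :: (PySem.Dict.getD (PySem.Dict.mk article) "content" "").toList)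

-- 'hits = [False]*n; for kw in keywords: hits = [h or kw in t for h, t in zip(hits, texts)]'
-- (the per-keyword pass only ORs flags in, so the result is independent of the set's iteration order)
def pvHits (keywords : PySem.Set String) (texts : List (List Char)) (n : Nat) : List Bool :=
  keywords.foldl
    (fun hits kw => List.zipWith (fun h t => h || PySem.Chars.isIn kw.toList t) hits texts)
    (List.replicate n false)

def filter_content_by_preferences_py_alt (articles : List (List (String × String))) (preferences : List (String × List String)) : List (List (String × String)) :=
  match preferences with
  | [] => articles
  | _ =>
    let categories := PySem.Dict.getD (PySem.Dict.mk preferences) "categories" ["all"]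
    if categories.contains "all" then articles
    else
      let texts := articles.map pvTextLower
      let hits := pvHits (pvKeywordUnion categories) texts articles.length
      let filtered := ((articles.zip hits).filter (fun p => p.2)).map (fun p => p.1)
      if filtered.isEmpty then PySem.List.slice articles none (some 5) else filtered

-- ===== PRECONDITION & SPEC =====
def Spec_filter_content_by_preferences_py (articles : List (List (String × String))) (preferences : List (String × List String)) (out : List (List (String × String))) : Prop := out = filter_content_by_preferences_py_alt articles preferences
instance (articles : List (List (String × String))) (preferences : List (String × List String)) (out : List (List (String × String))) : Decidable (Spec_filter_content_by_preferences_py articles preferences out) := by unfold Spec_filter_content_by_preferences_py; infer_instance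

-- ===== CLAIM (what is proved, stated in full; the proofs are below) =====
def Claim_equal_filter_content_by_preferences_py : Prop := ∀ (articles : List (List (String × String))) (preferences : List (String × List String)), Dom_filter_content_by_preferences_py articles preferences → Spec_filter_content_by_preferences_py articles preferences (filter_content_by_preferences_py articles preferences)

-- ===== LEMMAS AND PROOFS =====

-- any over a set extended by update = any over the set or over the added list
theorem pv_any_update (s : PySem.Set String) (l : List String) (p : String → Bool) :
    (PySem.Set.update s l).any p = (s.any p || l.any p) := by
  apply Bool.eq_iff_iff.mpr
  simp only [List.any_eq_true, Bool.or_eq_true]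
  constructor
  · rintro ⟨x, hx, hp⟩
    rcases (PySem.Set.mem_update _ _ _).1 hx with h | h
    · exact Or.inl ⟨x, h, hp⟩
    · exact Or.inr ⟨x, h, hp⟩
  · rintro (⟨x, hx, hp⟩ | ⟨x, hx, hp⟩) <;>
      exact ⟨x, (PySem.Set.mem_update _ _ _).2 (by first | exact Or.inl hx | exact Or.inr hx), hp⟩

-- any over the keyword-union set equals the nested any over categories
theorem pv_any_union (cats : List String) (p : String → Bool) (init : PySem.Set String) :
    (cats.foldl (fun s c => PySem.Set.update s (PySem.Dict.getD pvCatKeywords c [])) init).any p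
      = (init.any p || cats.any (fun c =>
          match PySem.Dict.get? pvCatKeywords c with
          | some kws => kws.any p
          | none => false)) := by
  induction cats generalizing init with
  | nil => simp
  | cons c cs ih =>
    simp only [List.foldl_cons, List.any_cons, ih, pv_any_update]
    have hgetD : (PySem.Dict.getD pvCatKeywords c []).any p
        = (match PySem.Dict.get? pvCatKeywords c with
           | some kws => kws.any p
           | none => false) := by
      unfold PySem.Dict.getD
      cases PySem.Dict.get? pvCatKeywords c <;> simp
    rw [hgetD, Bool.or_assoc]

-- zipWith of a composed step collapses (same right list twice)
theorem pv_zipWith_comp {α β : Type} (f g : β → α → β) (hs : List β) (ts : List α) :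
    List.zipWith f (List.zipWith g hs ts) ts = List.zipWith (fun h t => f (g h t) t) hs ts := by
  induction hs generalizing ts with
  | nil => simp
  | cons h hs ih => cases ts with
    | nil => simp
    | cons t ts => simp [ih]

-- zipWith that ignores the right list is the identity (equal lengths)
theorem pv_zipWith_left {α β : Type} (hs : List β) (ts : List α)
    (hlen : hs.length = ts.length) :
    List.zipWith (fun h _ => h) hs ts = hs := by
  induction hs generalizing ts with
  | nil => simp
  | cons h hs ih => cases ts with
    | nil => simp at hlen
    | cons t ts => simpa using ih ts (by simpa using hlen)

-- the keyword-outer marking loop computes, per text, the disjunction over all keywords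
theorem pv_hits_loop (kws : List String) (texts : List (List Char)) (hs : List Bool)
    (hlen : hs.length = texts.length) :
    kws.foldl (fun hits kw => List.zipWith (fun h t => h || PySem.Chars.isIn kw.toList t) hits texts) hs
      = List.zipWith (fun h t => h || kws.any (fun kw => PySem.Chars.isIn kw.toList t)) hs texts := by
  induction kws generalizing hs with
  | nil =>
    simp only [List.foldl_nil, List.any_nil, Bool.or_false]
    exact (pv_zipWith_left hs texts hlen).symm
  | cons kw kws ih =>
    rw [List.foldl_cons, ih _ (by simp [hlen]), pv_zipWith_comp]
    simp only [List.any_cons]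
    congr 1
    funext h t
    rw [Bool.or_assoc]

-- zip-collect against a mapped flag list is a filter
theorem pv_zip_collect {α : Type} (p : α → Bool) (as : List α) :
    ((as.zip (as.map p)).filter (fun q => q.2)).map (fun q => q.1) = as.filter p := by
  induction as with
  | nil => rfl
  | cons a as ih =>
    by_cases h : p a <;> simp [h, ih]

-- B's staged pipeline equals A's accumulator loop
theorem pv_pipeline_eq (categories : List String) (articles : List (List (String × String))) :
    ((articles.zip (pvHits (pvKeywordUnion categories) (articles.map pvTextLower) articles.length)).filter
        (fun p => p.2)).map (fun p => p.1)
      = pvFilteredA categories articles := by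
  have hhits : pvHits (pvKeywordUnion categories) (articles.map pvTextLower) articles.length
      = articles.map (pvMatchesA categories) := by
    unfold pvHits
    rw [show articles.length = (articles.map pvTextLower).length by simp]
    rw [pv_hits_loop _ _ _ (by simp)]
    have : ∀ ts : List (List Char),
        List.zipWith (fun h t => h || (pvKeywordUnion categories).any
            (fun kw => PySem.Chars.isIn kw.toList t)) (List.replicate ts.length false) ts
          = ts.map (fun t => (pvKeywordUnion categories).any
            (fun kw => PySem.Chars.isIn kw.toList t)) := by
      intro ts; induction ts with
      | nil => rfl
      | cons t ts ih => simpa [List.replicate_succ] using ih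
    rw [this, List.map_map]
    apply List.map_congr_left
    intro a _
    show (pvKeywordUnion categories).any _ = pvMatchesA categories a
    unfold pvKeywordUnion pvMatchesA pvTextLower
    rw [pv_any_union]
    simp [PySem.Set.empty]
  rw [hhits, pv_zip_collect]
  unfold pvFilteredA
  have := PySem.List.foldl_append_if (l := articles) (p := pvMatchesA categories)
    (f := fun a => a) (acc := ([] : List (List (String × String))))
  simp only [List.map_id'] at this
  rw [this, List.nil_append]

-- ===== VERDICT (by name: the statement is the Claim_ definition above) =====
theorem filter_content_by_preferences_py_spec : Claim_equal_filter_content_by_preferences_py := by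
  intro articles preferences _
  show filter_content_by_preferences_py articles preferences
      = filter_content_by_preferences_py_alt articles preferences
  cases preferences with
  | nil => rfl
  | cons q qs =>
    simp only [filter_content_by_preferences_py, filter_content_by_preferences_py_alt,
      pv_pipeline_eq, reduceCtorEq, if_false]
    by_cases hall : (PySem.Dict.getD (PySem.Dict.mk (q :: qs)) "categories" ["all"]).contains "all"
    · simp
    · simp only [Bool.not_eq_true] at hall
      simp only [hall, Bool.not_false, if_true]
      by_cases hf : pvFilteredA (PySem.Dict.getD (PySem.Dict.mk (q :: qs)) "categories" ["all"]) articles = []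
      · simp [hf]
      · simp [hf]
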